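-- pv_equiv track=rewrite | github.com/Tusharkalyani/web-scan-pro-o- | Authentication testing/auth.py | _guess_form_fields
-- ===== SOURCE A (Python) =====
-- from typing import List, Dict, Optional, Tuple, Any
--
-- USERNAME_KEYWORDS = ("user", "email", "login", "username", "userid")
--
-- PASSWORD_KEYWORDS = ("pass", "password")
--
-- CSRF_KEYWORDS = ("csrf", "token", "authenticity_token", "xsrf")
--
-- def _guess_form_fields(inputs: List[Dict[str, Any]]) -> Tuple[Optional[str], Optional[str], Dict[str, Any]]:
--
--     data = {}
--     usr_field = None
--     pwd_field = None
--     csrf_field = None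
--     for inp in inputs:
--         name = (inp.get("name") or "").strip()
--         lname = name.lower()
--         value = inp.get("value", "")
--         data[name] = value
--         if any(k in lname for k in USERNAME_KEYWORDS) and not usr_field:
--             usr_field = name
--         if any(k in lname for k in PASSWORD_KEYWORDS) and not pwd_field:
--             pwd_field = name
--         if any(k in lname for k in CSRF_KEYWORDS) and not csrf_field:
--             csrf_field = name
--     # fallback heuristics
--     if not (usr_field and pwd_field):
--         keys = [k for k in data.keys() if k]
--         if len(keys) >= 2:
--             # choose first as username-like and second as password-like
--             if not usr_field:
--                 usr_field = keys[0]
--             if not pwd_field: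
--                 pwd_field = keys[1]
--     return usr_field, pwd_field, data
-- ===== SOURCE B (Python) =====
-- USERNAME_KEYWORDS = ("user", "email", "login", "username", "userid")
-- PASSWORD_KEYWORDS = ("pass", "password")
--
-- def _guess_form_fields(inputs):
--     # build the name->value map first (last value wins, first-occurrence key order)
--     data = {}
--     for inp in inputs:
--         data[(inp.get("name") or "").strip()] = inp.get("value", "")
--     # then detect each field with its own scan over the ordered keys
--     usr_field = next((n for n in data if any(k in n.lower() for k in USERNAME_KEYWORDS)), None)
--     pwd_field = next((n for n in data if any(k in n.lower() for k in PASSWORD_KEYWORDS)), None)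
--     if usr_field is None or pwd_field is None:
--         keys = [k for k in data if k]
--         if len(keys) >= 2:
--             if usr_field is None:
--                 usr_field = keys[0]
--             if pwd_field is None:
--                 pwd_field = keys[1]
--     return usr_field, pwd_field, data
-- ===== Notes on version B (the rewrite author's own statement) =====
-- stated objective: simpler
-- what changed: A threads four pieces of state (dict + three first-match fields) through one loop; B builds the name->value dict in one plain loop and then finds the username and password fields by separate first-match scans over the ordered keys, dropping the never-returned csrf detection.
import Mathlib
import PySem

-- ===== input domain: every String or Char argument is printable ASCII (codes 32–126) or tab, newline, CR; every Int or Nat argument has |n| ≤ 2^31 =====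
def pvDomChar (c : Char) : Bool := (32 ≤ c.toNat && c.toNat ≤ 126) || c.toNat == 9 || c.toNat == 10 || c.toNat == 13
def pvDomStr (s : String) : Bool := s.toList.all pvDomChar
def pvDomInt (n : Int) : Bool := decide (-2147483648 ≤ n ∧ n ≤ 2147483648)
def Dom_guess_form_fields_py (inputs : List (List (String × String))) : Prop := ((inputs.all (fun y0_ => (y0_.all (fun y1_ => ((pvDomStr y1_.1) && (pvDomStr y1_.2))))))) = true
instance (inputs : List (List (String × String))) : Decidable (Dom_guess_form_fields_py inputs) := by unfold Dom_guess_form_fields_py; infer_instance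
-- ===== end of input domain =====

-- B builds the name→value dict in one plain loop and then detects the username/password
-- fields by separate first-match scans over the ordered keys (dropping the unused csrf
-- detection), instead of A's single loop threading four pieces of state; objective: simpler.

-- ===== PORT A =====
def pvKwU : List String := ["user", "email", "login", "username", "userid"]
def pvKwP : List String := ["pass", "password"]
def pvKwC : List String := ["csrf", "token", "authenticity_token", "xsrf"]

/-- Python truthiness test `not o` for an `Optional[str]`. -/
def pvFalsy (o : Option String) : Bool :=
  match o with
  | none => true
  | some s => s == ""

/-- `any(k in lname for k in kws)` -/
def pvMatch (kws : List String) (lname : String) : Bool :=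
  kws.any (fun k => PySem.Str.isIn k lname)

/-- `(inp.get("name") or "").strip()` (a missing key and the empty string both give `""`). -/
def pvName (inp : List (String × String)) : String :=
  PySem.Str.strip (((PySem.Dict.mk inp).get? "name").getD "")

/-- `inp.get("value", "")` -/
def pvValue (inp : List (String × String)) : String :=
  (PySem.Dict.mk inp).getD "value" ""

/-- A's single `for inp in inputs` loop over the state (data, usr_field, pwd_field, csrf_field). -/
def pvLoopA : List (List (String × String)) →
    PySem.Dict String String × Option String × Option String × Option String →
    PySem.Dict String String × Option String × Option String × Option String
  | [], st => st
  | inp :: rest, (d, u, p, c) =>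
    let name := pvName inp
    let lname := PySem.Str.lower name
    let d' := d.insert name (pvValue inp)
    let u' := if pvMatch pvKwU lname && pvFalsy u then some name else u
    let p' := if pvMatch pvKwP lname && pvFalsy p then some name else p
    let c' := if pvMatch pvKwC lname && pvFalsy c then some name else c
    pvLoopA rest (d', u', p', c')

def guess_form_fields_py (inputs : List (List (String × String))) : Option String × Option String × (List (String × String)) :=
  match pvLoopA inputs (PySem.Dict.empty, none, none, none) with
  | (d, u, p, _) =>
    let fin :=
      if !(!pvFalsy u && !pvFalsy p) then
        let keys := d.keys.filter (fun k => !(k == ""))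
        if 2 ≤ keys.length then
          (if pvFalsy u then some (keys.getD 0 "") else u,
           if pvFalsy p then some (keys.getD 1 "") else p)
        else (u, p)
      else (u, p)
    (fin.1, fin.2, d.items)

-- ===== PORT B =====
/-- B's first loop: `for inp in inputs: data[(inp.get("name") or "").strip()] = inp.get("value", "")`. -/
def pvBuild (inputs : List (List (String × String))) : PySem.Dict String String :=
  inputs.foldl (fun d inp => d.insert (pvName inp) (pvValue inp)) PySem.Dict.empty

/-- `next((n for n in data if any(k in n.lower() for k in kws)), None)` -/
def pvFind (kws : List String) (ks : List String) : Option String :=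
  ks.find? (fun n => pvMatch kws (PySem.Str.lower n))

def guess_form_fields_py_alt (inputs : List (List (String × String))) : Option String × Option String × (List (String × String)) :=
  let data := pvBuild inputs
  let usr := pvFind pvKwU data.keys
  let pwd := pvFind pvKwP data.keys
  let fin :=
    if usr.isNone || pwd.isNone then
      let keys := data.keys.filter (fun k => !(k == ""))
      if 2 ≤ keys.length then
        (if usr.isNone then some (keys.getD 0 "") else usr,
         if pwd.isNone then some (keys.getD 1 "") else pwd)
      else (usr, pwd)
    else (usr, pwd)
  (fin.1, fin.2, data.items)

-- ===== PRECONDITION & SPEC =====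
def Spec_guess_form_fields_py (inputs : List (List (String × String))) (out : Option String × Option String × (List (String × String))) : Prop := out = guess_form_fields_py_alt inputs
instance (inputs : List (List (String × String))) (out : Option String × Option String × (List (String × String))) : Decidable (Spec_guess_form_fields_py inputs out) := by unfold Spec_guess_form_fields_py; infer_instance

-- ===== CLAIM (what is proved, stated in full; the proofs are below) =====
def Claim_equal_guess_form_fields_py : Prop := ∀ (inputs : List (List (String × String))), Dom_guess_form_fields_py inputs → Spec_guess_form_fields_py inputs (guess_form_fields_py inputs)

-- ===== LEMMAS AND PROOFS =====

/-- A detection field is never the empty string once set. -/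
def pvGood (o : Option String) : Prop := ∀ s, o = some s → s ≠ ""

/-- What one detection field equals after the loop: kept if already set, else the first matching name. -/
def pvPost (o : Option String) (ns : List String) (kws : List String) : Option String :=
  match o with
  | some s => some s
  | none => ns.find? (fun n => pvMatch kws (PySem.Str.lower n))

lemma pvMatch_empty_U : pvMatch pvKwU (PySem.Str.lower "") = false := by decide
lemma pvMatch_empty_P : pvMatch pvKwP (PySem.Str.lower "") = false := by decide
lemma pvMatch_empty_C : pvMatch pvKwC (PySem.Str.lower "") = false := by decide

lemma pvGood_none : pvGood none := by intro s h; cases h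

lemma pvFalsy_of_good (o : Option String) (h : pvGood o) : pvFalsy o = o.isNone := by
  cases o with
  | none => rfl
  | some s =>
    have hs : s ≠ "" := h s rfl
    simp [pvFalsy, Option.isNone, hs]

/-- Effect of one loop step on one detection field. -/
lemma pvStep_opt (kws : List String) (hkw : pvMatch kws (PySem.Str.lower "") = false)
    (name : String) (o : Option String) (ho : pvGood o) (ns : List String) :
    pvGood (if pvMatch kws (PySem.Str.lower name) && pvFalsy o then some name else o) ∧
    pvPost (if pvMatch kws (PySem.Str.lower name) && pvFalsy o then some name else o) ns kws
      = pvPost o (name :: ns) kws := by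
  cases o with
  | some s =>
    have hs : s ≠ "" := ho s rfl
    simp [pvFalsy, hs, pvPost]
    exact ho
  | none =>
    by_cases hm : pvMatch kws (PySem.Str.lower name) = true
    · have hne : name ≠ "" := by
        intro h; rw [h] at hm; rw [hkw] at hm; cases hm
      constructor
      · simp [pvFalsy, hm]
        intro s hs
        injection hs with hs; rw [← hs]; exact hne
      · simp [pvFalsy, hm, pvPost, List.find?]
    · have hm' : pvMatch kws (PySem.Str.lower name) = false := by
        cases h : pvMatch kws (PySem.Str.lower name)
        · rfl
        · exact absurd h hm
      constructor
      · simp [hm']; exact pvGood_none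
      · simp [pvFalsy, hm', pvPost, List.find?]

/-- Loop invariant for A's single pass: the dict is the plain insert-fold and each
    detection field is "kept, else first matching name". -/
lemma pvLoopA_spec : ∀ (l : List (List (String × String))) (d : PySem.Dict String String)
    (u p c : Option String), pvGood u → pvGood p → pvGood c →
    pvLoopA l (d, u, p, c) =
      (l.foldl (fun d inp => d.insert (pvName inp) (pvValue inp)) d,
       pvPost u (l.map pvName) pvKwU,
       pvPost p (l.map pvName) pvKwP,
       pvPost c (l.map pvName) pvKwC) := by
  intro l
  induction l with
  | nil =>
    intro d u p c hu hp hc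
    simp [pvLoopA, pvPost]
    constructor
    · cases u <;> simp
    constructor
    · cases p <;> simp
    · cases c <;> simp
  | cons inp rest ih =>
    intro d u p c hu hp hc
    have hU := pvStep_opt pvKwU pvMatch_empty_U (pvName inp) u hu (rest.map pvName)
    have hP := pvStep_opt pvKwP pvMatch_empty_P (pvName inp) p hp (rest.map pvName)
    have hC := pvStep_opt pvKwC pvMatch_empty_C (pvName inp) c hc (rest.map pvName)
    simp only [pvLoopA]
    rw [ih _ _ _ _ hU.1 hP.1 hC.1]
    simp only [List.foldl_cons, List.map_cons, hU.2, hP.2, hC.2]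

/-- find? over the set-fold (ordered dedup) equals find? over the original followed by `.or`. -/
lemma pvFind?_foldl_add {p : String → Bool} : ∀ (l s : List String),
    List.find? p (List.foldl PySem.Set.add s l)
      = (List.find? p s).or (List.find? p (l.filter (fun x => !PySem.Set.contains s x))) := by
  intro l
  induction l with
  | nil => intro s; simp
  | cons x rest ih =>
    intro s
    simp only [List.foldl_cons]
    rw [ih (PySem.Set.add s x)]
    by_cases hx : x ∈ s
    · simp [PySem.Set.add, PySem.Set.contains, hx]
    · simp only [PySem.Set.add, PySem.Set.contains, List.contains_eq_mem, hx, decide_false,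
        Bool.false_eq_true, if_false, List.filter_cons]
      rw [List.find?_append, Option.or_assoc]
      simp only [Bool.not_false, if_true]
      congr 1
      by_cases hpx : p x = true
      · simp [List.find?, hpx]
      · have hpx' : p x = false := Bool.eq_false_iff.mpr hpx
        simp only [List.find?, hpx', Option.or, List.find?_filter]
        have hpred : (fun a => decide ((!decide (a ∈ s ++ [x])) = true ∧ p a = true))
            = (fun a => decide ((!decide (a ∈ s)) = true ∧ p a = true)) := by
          funext y
          by_cases hyx : y = x
          · subst hyx; simp [hpx']
          · simp [hyx]
        rw [hpred]

/-- find? over the first-occurrence dedup = find? over the list itself. -/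
lemma pvFind?_ofList (p : String → Bool) (l : List String) :
    List.find? p (PySem.Set.ofList l) = List.find? p l := by
  rw [PySem.Set.ofList, pvFind?_foldl_add]
  simp [PySem.Set.empty, PySem.Set.contains]

lemma pvMatch_find_ne_empty (kws : List String) (hkw : pvMatch kws (PySem.Str.lower "") = false)
    (ns : List String) : pvGood (ns.find? (fun n => pvMatch kws (PySem.Str.lower n))) := by
  intro s hs h
  have := List.find?_some hs
  rw [h, hkw] at this
  cases this

-- ===== VERDICT (by name: the statement is the Claim_ definition above) =====
theorem guess_form_fields_py_spec : Claim_equal_guess_form_fields_py := by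
  intro inputs _
  unfold Spec_guess_form_fields_py
  unfold guess_form_fields_py guess_form_fields_py_alt
  rw [pvLoopA_spec inputs PySem.Dict.empty none none none pvGood_none pvGood_none pvGood_none]
  have hkeys : (pvBuild inputs).keys = PySem.Set.ofList (inputs.map pvName) := by
    rw [pvBuild, PySem.Dict.keys_foldl_insert_key]
    simp [PySem.Set.update_nil_left]
  have hu : pvFind pvKwU (pvBuild inputs).keys
      = (inputs.map pvName).find? (fun n => pvMatch pvKwU (PySem.Str.lower n)) := by
    rw [pvFind, hkeys, pvFind?_ofList]
  have hp : pvFind pvKwP (pvBuild inputs).keys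
      = (inputs.map pvName).find? (fun n => pvMatch pvKwP (PySem.Str.lower n)) := by
    rw [pvFind, hkeys, pvFind?_ofList]
  have hgu := pvMatch_find_ne_empty pvKwU pvMatch_empty_U (inputs.map pvName)
  have hgp := pvMatch_find_ne_empty pvKwP pvMatch_empty_P (inputs.map pvName)
  simp only [pvPost, pvBuild] at *
  rw [hu, hp]
  rw [pvFalsy_of_good _ hgu, pvFalsy_of_good _ hgp]
  simp [Bool.not_and]
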